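-- pv_equiv track=rewrite | github.com/zampie/zampie_utils | zampie_utils/utils.py | remove_blank_lines
-- ===== SOURCE A (Python) =====
-- def remove_blank_lines(dialog):
--     """
--     Args:
--         dialog: str, dialog content
--     """
--     dialog = dialog.strip()
--     dialog_list = []
--     for line in dialog.split("\n"):
--         if not line:
--             continue
--         dialog_list.append(line)
--
--     dialog = "\n".join(dialog_list)
--
--     return dialog
-- ===== SOURCE B (Python) =====
-- def remove_blank_lines(dialog):
--     # single left-to-right character pass: after stripping, a newline is kept
--     # only when the previously kept character is not a newline (collapsing
--     # every run of newlines to one == dropping empty lines)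
--     dialog = dialog.strip()
--     out = []
--     for c in dialog:
--         if c == "\n" and out and out[-1] == "\n":
--             continue
--         out.append(c)
--     return "".join(out)
-- ===== Notes on version B (the rewrite author's own statement) =====
-- stated objective: alternative
-- what changed: Replaces split-into-lines / filter-empty / join with a single left-to-right character pass that drops a newline exactly when the previously kept character is a newline.
import Mathlib
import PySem

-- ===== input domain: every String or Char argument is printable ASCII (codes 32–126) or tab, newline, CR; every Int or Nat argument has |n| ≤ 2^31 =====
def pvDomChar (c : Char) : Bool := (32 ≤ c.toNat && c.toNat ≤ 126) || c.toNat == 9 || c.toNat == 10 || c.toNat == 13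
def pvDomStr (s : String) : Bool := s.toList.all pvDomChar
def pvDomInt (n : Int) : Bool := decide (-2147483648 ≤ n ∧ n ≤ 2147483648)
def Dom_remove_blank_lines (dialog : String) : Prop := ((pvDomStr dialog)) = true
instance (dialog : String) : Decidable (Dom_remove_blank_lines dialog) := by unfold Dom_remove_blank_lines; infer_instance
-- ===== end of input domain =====

-- B replaces split/filter/join with a single character pass collapsing newline runs (alternative decomposition, same cost).


-- ===== PORT A =====
-- dialog.strip(); for line in dialog.split("\n"): if not line: continue; append; "\n".join(...)
def remove_blank_lines (dialog : String) : String :=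
  let d := PySem.Chars.strip dialog.toList
  let dialog_list := (PySem.Chars.splitOn d ['\n']).foldl
    (fun acc line => if line = [] then acc else acc ++ [line]) []
  String.mk (PySem.Chars.join ['\n'] dialog_list)

-- ===== PORT B =====
-- dialog.strip(); one pass over the characters: skip '\n' when out and out[-1] == '\n'; "".join(out)
def remove_blank_lines_alt (dialog : String) : String :=
  let s := PySem.Chars.strip dialog.toList
  String.mk (s.foldl
    (fun out c => if c == '\n' && !out.isEmpty && out.getLast? == some '\n' then out else out ++ [c]) [])

-- ===== PRECONDITION & SPEC =====
def Spec_remove_blank_lines (dialog : String) (out : String) : Prop := out = remove_blank_lines_alt dialog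
instance (dialog : String) (out : String) : Decidable (Spec_remove_blank_lines dialog out) := by unfold Spec_remove_blank_lines; infer_instance

-- ===== CLAIM (what is proved, stated in full; the proofs are below) =====
def Claim_equal_remove_blank_lines : Prop := ∀ (dialog : String), Dom_remove_blank_lines dialog → Spec_remove_blank_lines dialog (remove_blank_lines dialog)

-- ===== LEMMAS AND PROOFS =====

-- B's pass, as a recursive function: collapse every run of newlines to a single newline.
def pvCr : List Char → List Char
  | [] => []
  | a :: l => if a = '\n' then '\n' :: pvCr (l.dropWhile (· == '\n')) else a :: pvCr l
termination_by l => l.length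
decreasing_by
  · have := (List.dropWhile_suffix (l := l) (· == '\n')).length_le; simp; omega
  · simp

-- structural form of A's split on '\n'
def pvSS : List Char → List (List Char)
  | [] => [[]]
  | a :: l => if a = '\n' then [] :: pvSS l else (a :: (pvSS l).headI) :: (pvSS l).tail

theorem pv_headI_tail {α : Type} [Inhabited α] (l : List α) (h : l ≠ []) : l.headI :: l.tail = l := by
  cases l with
  | nil => exact absurd rfl h
  | cons a l => rfl

theorem pvSS_ne_nil (l : List Char) : pvSS l ≠ [] := by
  cases l <;> simp [pvSS] <;> split <;> simp

theorem pv_splitOn_go (fuel : Nat) :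
    ∀ (l cur : List Char) (acc : List (List Char)), l.length < fuel →
      PySem.Chars.splitOn.go ['\n'] fuel l cur acc
        = acc.reverse ++ ((cur.reverse ++ (pvSS l).headI) :: (pvSS l).tail) := by
  induction fuel with
  | zero => intro l cur acc h; omega
  | succ f ih =>
    intro l cur acc h
    cases l with
    | nil => simp [PySem.Chars.splitOn.go, pvSS]
    | cons a rest =>
      by_cases ha : a = '\n'
      · subst ha
        have hpre : List.isPrefixOf ['\n'] ('\n' :: rest) = true := by
          simp [List.isPrefixOf]
        rw [PySem.Chars.splitOn.go]
        simp only [hpre, if_pos]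
        have := ih rest [] (cur.reverse :: acc) (by simpa using Nat.lt_of_succ_lt_succ h)
        simp only [List.length_cons, List.length_nil, List.drop_succ_cons, List.drop_zero]
        rw [this]
        have hne := pvSS_ne_nil rest
        simp [pvSS, pv_headI_tail _ hne]
      · have hpre : List.isPrefixOf ['\n'] (a :: rest) = false := by
          simp [List.isPrefixOf]; intro hc; exact absurd hc.symm ha
        rw [PySem.Chars.splitOn.go]
        simp only [hpre, Bool.false_eq_true, if_false]
        have := ih rest (a :: cur) acc (by simpa using Nat.lt_of_succ_lt_succ h)
        rw [this]
        simp [pvSS, ha]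

theorem pv_splitOn_eq (l : List Char) : PySem.Chars.splitOn l ['\n'] = pvSS l := by
  unfold PySem.Chars.splitOn
  rw [pv_splitOn_go (l.length + 1) l [] [] (by omega)]
  simp only [List.reverse_nil, List.nil_append]
  exact pv_headI_tail _ (pvSS_ne_nil l)

-- A's filtering foldl is a filter
theorem pv_foldl_filter (L : List (List Char)) (acc : List (List Char)) :
    L.foldl (fun acc line => if line = [] then acc else acc ++ [line]) acc
      = acc ++ L.filter (fun line => !line.isEmpty) := by
  induction L generalizing acc with
  | nil => simp
  | cons x L ih => cases x <;> simp [ih]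

theorem pv_join_cons (sep : List Char) (a : Char) (x : List Char) (r : List (List Char)) :
    PySem.Chars.join sep ((a :: x) :: r) = a :: PySem.Chars.join sep (x :: r) := by
  cases r with
  | nil => simp [PySem.Chars.join_singleton]
  | cons y r => simp [PySem.Chars.join_cons_cons]

theorem pv_filter_dropNl (l : List Char) :
    (pvSS (l.dropWhile (· == '\n'))).filter (fun s => !s.isEmpty)
      = (pvSS l).filter (fun s => !s.isEmpty) := by
  induction l with
  | nil => simp
  | cons a l ih =>
    by_cases ha : a = '\n'
    · simp [ha, pvSS, ih]
    · simp [ha]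

theorem pv_allNl_getLast (l : List Char) (h : ∀ c ∈ l, c = '\n') (hne : l ≠ []) :
    l.getLast? = some '\n' := by
  induction l with
  | nil => exact absurd rfl hne
  | cons a l ih =>
    cases l with
    | nil => simp [h a (by simp)]
    | cons b l =>
      rw [List.getLast?_cons_cons]
      exact ih (fun c hc => h c (by simp [hc])) (by simp)

-- main A-side characterisation: on strings with no leading and no trailing newline,
-- join-of-nonempty-pieces equals the newline-run collapse pvCr
theorem pv_J_eq_cr (n : Nat) : ∀ (l : List Char), l.length ≤ n →
    (∀ c, l.head? = some c → c ≠ '\n') → (∀ c, l.getLast? = some c → c ≠ '\n') →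
    PySem.Chars.join ['\n'] ((pvSS l).filter (fun s => !s.isEmpty)) = pvCr l := by
  induction n with
  | zero =>
    intro l hl _ _
    have : l = [] := List.length_eq_zero_iff.mp (Nat.le_zero.mp hl)
    subst this; simp [pvSS, pvCr, PySem.Chars.join_nil]
  | succ n ih =>
    intro l hl hhd hlast
    cases l with
    | nil => simp [pvSS, pvCr, PySem.Chars.join_nil]
    | cons a l' =>
      have ha : a ≠ '\n' := hhd a (by simp)
      cases l' with
      | nil =>
        simp [pvSS, pvCr, ha, PySem.Chars.join_singleton]
      | cons b l'' =>
        by_cases hb : b = '\n'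
        · subst hb
          -- l = a :: '\n' :: l'' ; let m be l'' without its leading newlines
          set m := l''.dropWhile (· == '\n') with hm
          have hmne : m ≠ [] := by
            intro hnil
            have hall : ∀ c ∈ l'', c = '\n' := by
              intro c hc
              have := List.dropWhile_eq_nil_iff.mp (hm ▸ hnil)
              simpa using this c hc
            have hgl : ('\n' :: l'').getLast? = some '\n' :=
              pv_allNl_getLast _ (by intro c hc; rcases List.mem_cons.mp hc with h | h; exact h; exact hall c h) (by simp)
            exact hlast '\n' (by rw [List.getLast?_cons_cons]; exact hgl) rfl
          have hmhd : ∀ c, m.head? = some c → c ≠ '\n' := by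
            intro c hc
            have := List.head?_dropWhile_not (· == '\n') l''
            rw [← hm, hc] at this
            simpa using this
          have hl''ne : l'' ≠ [] := by
            intro h; apply hmne; rw [hm, h]; simp
          have hmlast : ∀ c, m.getLast? = some c → c ≠ '\n' := by
            intro c hc
            obtain ⟨t, ht⟩ := List.dropWhile_suffix (l := l'') (· == '\n')
            exact hlast c (by
              rw [List.getLast?_cons_cons]
              rw [show ('\n' :: l'') = ['\n'] ++ l'' from rfl]
              rw [List.getLast?_append_of_ne_nil _ hl''ne]
              rw [show l'' = t ++ m from (hm ▸ ht).symm]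
              rw [List.getLast?_append_of_ne_nil _ hmne]
              exact hc)
          have hmlen : m.length ≤ n := by
            have h1 : m.length ≤ l''.length := (hm ▸ List.dropWhile_suffix (l := l'') (· == '\n')).length_le
            simp at hl; omega
          have ihm := ih m hmlen hmhd hmlast
          -- compute the pieces
          have hfil : (pvSS (a :: '\n' :: l'')).filter (fun s => !s.isEmpty)
              = [a] :: (pvSS m).filter (fun s => !s.isEmpty) := by
            rw [show pvSS (a :: '\n' :: l'') = (a :: (pvSS ('\n' :: l'')).headI) :: (pvSS ('\n' :: l'')).tail
                  from by simp [pvSS, ha]]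
            rw [show pvSS ('\n' :: l'') = [] :: pvSS l'' from by simp [pvSS]]
            simp [pv_filter_dropNl l'', hm]
          rw [hfil]
          -- the filtered list of m is nonempty: pvSS m's head is nonempty
          obtain ⟨c, cs, hcons⟩ : ∃ c cs, m = c :: cs := List.exists_cons_of_ne_nil hmne
          have hc' : c ≠ '\n' := hmhd c (by rw [hcons]; rfl)
          have hheadm : pvSS m = (c :: (pvSS cs).headI) :: (pvSS cs).tail := by
            rw [hcons]; simp [pvSS, hc']
          have hfne : (pvSS m).filter (fun s => !s.isEmpty)
              = (c :: (pvSS cs).headI) :: ((pvSS cs).tail.filter (fun s => !s.isEmpty)) := by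
            rw [hheadm]; simp
          rw [show pvCr (a :: '\n' :: l'') = a :: '\n' :: pvCr m from by
            rw [pvCr, if_neg ha, pvCr, if_pos rfl, hm]]
          rw [hfne, PySem.Chars.join_cons_cons, ← hfne, ihm]
          simp
        · -- head of l' is not a newline: peel one character
          have hhd' : ∀ c, (b :: l'').head? = some c → c ≠ '\n' := by
            intro c hc; simp at hc; subst hc; exact hb
          have hlast' : ∀ c, (b :: l'').getLast? = some c → c ≠ '\n' := by
            intro c hc; exact hlast c (by rw [List.getLast?_cons_cons]; exact hc)
          have ihl' := ih (b :: l'') (by simp at hl ⊢; omega) hhd' hlast'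
          have hssb : pvSS (b :: l'') = (b :: (pvSS l'').headI) :: (pvSS l'').tail := by
            simp [pvSS, hb]
          have hssa : pvSS (a :: b :: l'') = (a :: b :: (pvSS l'').headI) :: (pvSS l'').tail := by
            simp [pvSS, ha, hb]
          rw [show pvCr (a :: b :: l'') = a :: pvCr (b :: l'') from by rw [pvCr, if_neg ha]]
          rw [← ihl', hssa, hssb]
          simp only [List.filter_cons, show (!(a :: b :: (pvSS l'').headI).isEmpty) = true from by simp,
            show (!(b :: (pvSS l'').headI).isEmpty) = true from by simp]
          exact pv_join_cons _ a _ _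

-- B-side: the foldl builds pvCr
theorem pv_foldlB (l : List Char) : ∀ (out : List Char),
    l.foldl (fun out c => if c == '\n' && !out.isEmpty && out.getLast? == some '\n' then out else out ++ [c]) out
      = out ++ (if out.getLast? = some '\n' then pvCr (l.dropWhile (· == '\n')) else pvCr l) := by
  induction l with
  | nil => intro out; split <;> simp [pvCr]
  | cons a l ih =>
    intro out
    by_cases hlastn : out.getLast? = some '\n'
    · have houtne : out ≠ [] := by intro h; rw [h] at hlastn; simp at hlastn
      by_cases ha : a = '\n'
      · subst ha
        rw [List.foldl_cons]
        rw [if_pos (by simp [hlastn, houtne])]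
        rw [ih out, if_pos hlastn, if_pos hlastn]
        simp
      · rw [List.foldl_cons]
        rw [if_neg (by simp [ha])]
        rw [ih (out ++ [a])]
        rw [if_neg (by simp [ha]), if_pos hlastn]
        rw [List.dropWhile_cons, if_neg (by simp [ha])]
        rw [show pvCr (a :: l) = a :: pvCr l from by rw [pvCr, if_neg ha]]
        simp
    · rw [List.foldl_cons]
      rw [if_neg (by simp [hlastn])]
      rw [ih (out ++ [a])]
      by_cases ha : a = '\n'
      · subst ha
        rw [if_pos (by simp), if_neg hlastn]
        rw [show pvCr ('\n' :: l) = '\n' :: pvCr (l.dropWhile (· == '\n')) from by rw [pvCr, if_pos rfl]]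
        simp
      · rw [if_neg (by simp [ha]), if_neg hlastn]
        rw [show pvCr (a :: l) = a :: pvCr l from by rw [pvCr, if_neg ha]]
        simp

-- the stripped string has no leading and no trailing newline
theorem pv_strip_head (s : List Char) (c : Char) (h : (PySem.Chars.strip s).head? = some c) : c ≠ '\n' := by
  have hne : PySem.Chars.strip s ≠ [] := by intro hn; rw [hn] at h; simp at h
  have hpre : PySem.Chars.strip s <+: PySem.Chars.lstrip s := by
    unfold PySem.Chars.strip PySem.Chars.rstrip
    have := List.dropWhile_suffix (l := (PySem.Chars.lstrip s).reverse) PySem.Chars.isspace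
    obtain ⟨t, ht⟩ := this
    exact ⟨t.reverse, by rw [← List.reverse_append, ht, List.reverse_reverse]⟩
  obtain ⟨t, ht⟩ := hpre
  have : (PySem.Chars.lstrip s).head? = some c := by
    rw [← ht, List.head?_append_of_ne_nil _ hne, h]
  have hns := List.head?_dropWhile_not PySem.Chars.isspace s
  unfold PySem.Chars.lstrip at this
  rw [this] at hns
  intro hc; subst hc
  exact absurd hns (by decide)

theorem pv_strip_last (s : List Char) (c : Char) (h : (PySem.Chars.strip s).getLast? = some c) : c ≠ '\n' := by
  unfold PySem.Chars.strip PySem.Chars.rstrip at h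
  rw [List.getLast?_reverse] at h
  have hns := List.head?_dropWhile_not PySem.Chars.isspace (PySem.Chars.lstrip s).reverse
  rw [h] at hns
  intro hc; subst hc
  exact absurd hns (by decide)

-- ===== VERDICT (by name: the statement is the Claim_ definition above) =====
theorem remove_blank_lines_spec : Claim_equal_remove_blank_lines := by
  intro dialog _
  unfold Spec_remove_blank_lines remove_blank_lines remove_blank_lines_alt
  apply congrArg String.mk
  rw [pv_foldl_filter, pv_splitOn_eq, List.nil_append]
  rw [pv_foldlB, if_neg (by simp), List.nil_append]
  exact pv_J_eq_cr (PySem.Chars.strip dialog.toList).length _ le_rfl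
    (pv_strip_head dialog.toList) (pv_strip_last dialog.toList)
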